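-- pv_equiv track=rewrite | github.com/nnaX000/Baekjoon_Programmers | 프로그래머스/3/12987. 숫자 게임/숫자 게임.py | solution
-- ===== SOURCE A (Python) =====
-- import heapq
--
-- def solution(A, B):
--     answer = 0
--     A.sort()
--
--     heapq.heapify(B)
--     tmp=heapq.heappop(B)
--
--     for i in range(len(A)):
--         while(tmp<=A[i]):
--             if(B):
--                 tmp = heapq.heappop(B)
--             else:
--                 return answer
--
--         answer+=1
--         if(B):
--             tmp = heapq.heappop(B)
--         else:
--             return answer
--
--     return answer
-- ===== SOURCE B (Python) =====
-- def solution(A, B):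
--     # Binary search on the answer: k wins are achievable iff the k largest of B
--     # pairwise beat the k smallest of A. Feasibility is monotone in k, so bisect.
--     A.sort()
--     sb = sorted(B)
--     m = len(sb)
--
--     def wins(k):
--         return all(a < b for a, b in zip(A[:k], sb[m - k:]))
--
--     lo, hi = 0, min(len(A), m)
--     while lo < hi:
--         mid = (lo + hi + 1) // 2
--         if wins(mid):
--             lo = mid
--         else:
--             hi = mid - 1
--     return lo
-- ===== Notes on version B (the rewrite author's own statement) =====
-- stated objective: alternative
-- what changed: Replaces A's heap-greedy matching (heapify B, repeatedly heappop and pair against sorted A) by a binary search on the answer itself: k wins are feasible iff the k largest of B pairwise beat the k smallest of A, and feasibility is monotone in k, so B bisects for the largest feasible k.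
import Mathlib
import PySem

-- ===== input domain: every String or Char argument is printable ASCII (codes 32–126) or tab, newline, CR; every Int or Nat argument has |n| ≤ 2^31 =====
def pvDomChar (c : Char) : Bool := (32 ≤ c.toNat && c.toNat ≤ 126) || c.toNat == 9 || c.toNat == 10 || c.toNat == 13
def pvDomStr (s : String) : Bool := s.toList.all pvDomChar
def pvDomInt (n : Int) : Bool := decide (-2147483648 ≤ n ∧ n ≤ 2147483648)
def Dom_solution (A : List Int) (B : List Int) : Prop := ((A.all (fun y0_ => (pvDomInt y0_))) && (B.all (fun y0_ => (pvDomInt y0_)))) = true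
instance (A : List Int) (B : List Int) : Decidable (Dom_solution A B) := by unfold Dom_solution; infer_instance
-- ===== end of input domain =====

-- B replaces A's heap-greedy matching by a binary search on the answer (objective: alternative,
-- same asymptotic cost). Return-value equivalence only: A mutates its arguments in place (sorts
-- A, heapifies and drains B); B sorts A in place but leaves B untouched.

-- ===== PORT A =====
-- A's min-heap over Int values is modelled by the ascending-sorted list of B's elements:
-- heappop returns the minimum remaining value, i.e. the head; exact for the returned value.
-- The for/while/early-return structure of A is kept as is: `loopA` is the for-loop over the
-- remaining elements of sorted A, carrying `tmp` (the last popped value), the remaining heap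
-- and `answer`.
def loopA : List Int → Int → List Int → Int → Int
  | [], _, _, ans => ans
  | a :: as, tmp, heap, ans =>
    if tmp ≤ a then
      match heap with
      | [] => ans                        -- while-body: B empty → return answer
      | t :: h => loopA (a :: as) t h ans
    else
      match heap with
      | [] => ans + 1                    -- after answer+=1: B empty → return answer
      | t :: h => loopA as t h (ans + 1)
  termination_by _ _ heap _ => heap.length

def solution (A : List Int) (B : List Int) : Int :=
  let As := PySem.List.sorted A (fun x => x) false
  match PySem.List.sorted B (fun x => x) false with
  | [] => 0                              -- Python: heappop on empty B raises IndexError (outside Pre_)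
  | tmp :: rest => loopA As tmp rest 0

-- ===== PORT B =====
-- wins(k) = all(a < b for a, b in zip(A[:k], sb[m-k:]))
-- (the slices have bounds 0 ≤ k ≤ len and 0 ≤ m-k ≤ m, so take/drop are exact for them)
def winsB (sa sb : List Int) (k : Nat) : Bool :=
  ((sa.take k).zip (sb.drop (sb.length - k))).all (fun p => decide (p.1 < p.2))

-- while lo < hi: mid = (lo+hi+1)//2; if wins(mid): lo = mid else: hi = mid-1
def bsearchB (sa sb : List Int) (lo hi : Nat) : Nat :=
  if lo < hi then
    let mid := (lo + hi + 1) / 2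
    if winsB sa sb mid then bsearchB sa sb mid hi
    else bsearchB sa sb lo (mid - 1)
  else lo
  termination_by hi - lo
  decreasing_by all_goals omega

def solution_alt (A : List Int) (B : List Int) : Int :=
  let As := PySem.List.sorted A (fun x => x) false
  let sb := PySem.List.sorted B (fun x => x) false
  (bsearchB As sb 0 (min As.length sb.length) : Int)

-- ===== PRECONDITION & SPEC =====
-- Pre_ excludes exactly the inputs where A raises: empty B (heappop of an empty heap).
def Pre_solution (A : List Int) (B : List Int) : Prop := B ≠ []
instance (A : List Int) (B : List Int) : Decidable (Pre_solution A B) := by unfold Pre_solution; infer_instance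
def pvWitness_solution : List Int × List Int := ([3, 1], [2, 4])

def Spec_solution (A : List Int) (B : List Int) (out : Int) : Prop := out = solution_alt A B
instance (A : List Int) (B : List Int) (out : Int) : Decidable (Spec_solution A B out) := by unfold Spec_solution; infer_instance

-- ===== CLAIM (what is proved, stated in full; the proofs are below) =====
def Claim_equal_solution : Prop := ∀ (A : List Int) (B : List Int), Dom_solution A B → Pre_solution A B → Spec_solution A B (solution A B)

-- ===== LEMMAS AND PROOFS =====

-- The clean greedy recursion on the two sorted lists; proof-side bridge between the ports.
def gED : List Int → List Int → Int
  | [], _ => 0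
  | _ :: _, [] => 0
  | a :: as, b :: bs => if b ≤ a then gED (a :: as) bs else 1 + gED as bs
  termination_by x y => x.length + y.length

theorem gED_nil_right (as : List Int) : gED as [] = 0 := by
  cases as <;> simp [gED]

theorem loopA_eq_g (n : Nat) : ∀ (as : List Int) (tmp : Int) (heap : List Int) (ans : Int),
    as.length + heap.length ≤ n → loopA as tmp heap ans = ans + gED as (tmp :: heap) := by
  induction n with
  | zero =>
    intro as tmp heap ans h
    have has : as = [] := by cases as <;> simp_all
    subst has; simp [loopA, gED]
  | succ n ih =>
    intro as tmp heap ans h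
    cases as with
    | nil => simp [loopA, gED]
    | cons a as =>
      rw [loopA.eq_def]
      simp only
      by_cases hle : tmp ≤ a
      · simp only [hle, if_true]
        cases heap with
        | nil => simp [gED, hle]
        | cons t hp =>
          simp only
          rw [ih (a :: as) t hp ans (by simp at h ⊢; omega)]
          simp [gED, hle]
      · simp only [hle, if_false]
        cases heap with
        | nil => simp [gED, gED_nil_right, hle]
        | cons t hp =>
          simp only
          rw [ih as t hp (ans + 1) (by simp at h ⊢; omega)]
          simp only [gED, hle, if_false]
          ring

theorem winsB_zero (sa sb : List Int) : winsB sa sb 0 = true := by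
  simp [winsB]

theorem winsB_iff (sa sb : List Int) (k : Nat) (hk1 : k ≤ sa.length) (hk2 : k ≤ sb.length) :
    winsB sa sb k = true ↔
      ∀ i (hi : i < k), sa[i]'(by omega) < sb[sb.length - k + i]'(by omega) := by
  unfold winsB
  rw [List.all_eq_true]
  constructor
  · intro h i hi
    have hlen : ((sa.take k).zip (sb.drop (sb.length - k))).length = k := by
      simp; omega
    have hmem : ((sa.take k).zip (sb.drop (sb.length - k)))[i]'(by omega) ∈
        ((sa.take k).zip (sb.drop (sb.length - k))) := List.getElem_mem _
    have := h _ hmem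
    simpa [List.getElem_zip, List.getElem_take, List.getElem_drop] using this
  · intro h p hp
    obtain ⟨i, hi, hpe⟩ := List.mem_iff_getElem.mp hp
    have hik : i < k := by simp at hi; omega
    subst hpe
    simpa [List.getElem_zip, List.getElem_take, List.getElem_drop] using h i hik

theorem winsB_anti (sa sb : List Int) (hsb : sb.Pairwise (· ≤ ·)) (k : Nat)
    (hk1 : k + 1 ≤ sa.length) (hk2 : k + 1 ≤ sb.length)
    (hw : winsB sa sb (k + 1) = true) : winsB sa sb k = true := by
  rw [winsB_iff sa sb (k + 1) hk1 hk2] at hw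
  rw [winsB_iff sa sb k (by omega) (by omega)]
  intro i hi
  have h1 := hw i (by omega)
  have h2 : sb[sb.length - (k + 1) + i]'(by omega) ≤ sb[sb.length - k + i]'(by omega) := by
    exact List.pairwise_iff_getElem.mp hsb _ _ (by omega) (by omega) (by omega)
  omega

theorem winsB_mono_down (sa sb : List Int) (hsb : sb.Pairwise (· ≤ ·)) :
    ∀ (j : Nat), j ≤ min sa.length sb.length → winsB sa sb j = true →
      ∀ k, k ≤ j → winsB sa sb k = true := by
  intro j
  induction j with
  | zero => intro _ hw k hk; interval_cases k; exact hw
  | succ j ih =>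
    intro hj hw k hk
    rcases Nat.lt_or_ge k (j + 1) with hlt | hge
    · exact ih (by omega) (winsB_anti sa sb hsb j (by omega) (by omega) hw) k (by omega)
    · have : k = j + 1 := by omega
      subst this; exact hw

-- winsB over (b :: bs) at level k ≤ |bs| only looks at the top k of bs.
theorem winsB_cons_right (sa : List Int) (b : Int) (bs : List Int) (k : Nat)
    (hk : k ≤ bs.length) : winsB sa (b :: bs) k = winsB sa bs k := by
  unfold winsB
  have h1 : (b :: bs).length - k = (bs.length - k) + 1 := by simp; omega
  rw [h1, List.drop_succ_cons]

theorem findGreatest_congr (P Q : Nat → Prop) [DecidablePred P] [DecidablePred Q] (n : Nat)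
    (h : ∀ k ≤ n, (P k ↔ Q k)) : Nat.findGreatest P n = Nat.findGreatest Q n := by
  induction n with
  | zero => rfl
  | succ n ih =>
    rw [Nat.findGreatest_succ (P := P), Nat.findGreatest_succ (P := Q)]
    by_cases hp : P (n + 1)
    · rw [if_pos hp, if_pos ((h (n + 1) le_rfl).mp hp)]
    · rw [if_neg hp, if_neg (fun hq => hp ((h (n + 1) le_rfl).mpr hq)),
        ih (fun k hk => h k (by omega))]

theorem findGreatest_shift (P Q : Nat → Prop) [DecidablePred P] [DecidablePred Q] (n : Nat)
    (h0 : Q 0) (h : ∀ k ≤ n, (P (k + 1) ↔ Q k)) :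
    Nat.findGreatest P (n + 1) = Nat.findGreatest Q n + 1 := by
  induction n with
  | zero =>
    rw [Nat.findGreatest_succ, if_pos ((h 0 le_rfl).mpr h0)]
    simp [Nat.findGreatest]
  | succ n ih =>
    rw [Nat.findGreatest_succ (P := P) (n + 1), Nat.findGreatest_succ (P := Q) n]
    by_cases hq : Q (n + 1)
    · rw [if_pos ((h (n + 1) le_rfl).mpr hq), if_pos hq]
    · rw [if_neg (fun hp => hq ((h (n + 1) le_rfl).mp hp)), if_neg hq,
        ih (fun k hk => h k (by omega))]

theorem g_eq_findGreatest (n : Nat) : ∀ (sa sb : List Int),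
    sa.length + sb.length ≤ n → sb.Pairwise (· ≤ ·) →
    gED sa sb = (Nat.findGreatest (fun k => winsB sa sb k = true) (min sa.length sb.length) : Int) := by
  induction n with
  | zero =>
    intro sa sb h _
    have : sa = [] := by cases sa <;> simp_all
    subst this
    simp [gED]
  | succ n ih =>
    intro sa sb h hsb
    cases sb with
    | nil => cases sa <;> simp [gED]
    | cons b bs =>
      cases sa with
      | nil => simp [gED]
      | cons a as =>
        have hbs : bs.Pairwise (· ≤ ·) := hsb.of_cons
        by_cases hba : b ≤ a
        · -- g (a::as) (b::bs) = g (a::as) bs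
          rw [show gED (a :: as) (b :: bs) = gED (a :: as) bs by rw [gED]; simp [hba]]
          rw [ih (a :: as) bs (by simp at h ⊢; omega) hbs]
          congr 1
          by_cases hle : as.length + 1 ≤ bs.length
          · have e1 : min (a :: as).length (b :: bs).length = as.length + 1 := by simp; omega
            have e2 : min (a :: as).length bs.length = as.length + 1 := by simp; omega
            rw [e1, e2]
            exact (findGreatest_congr _ _ _ (fun k hk => by
              show winsB (a :: as) (b :: bs) k = true ↔ winsB (a :: as) bs k = true
              rw [winsB_cons_right (a :: as) b bs k (by omega)])).symm
          · have e1 : min (a :: as).length (b :: bs).length = bs.length + 1 := by simp; omega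
            have e2 : min (a :: as).length bs.length = bs.length := by simp; omega
            rw [e1, e2, Nat.findGreatest_succ]
            have hnot : ¬ winsB (a :: as) (b :: bs) (bs.length + 1) = true := by
              intro hw
              rw [winsB_iff (a :: as) (b :: bs) (bs.length + 1) (by simp; omega) (by simp)] at hw
              have := hw 0 (by omega)
              simp at this
              omega
            rw [if_neg hnot]
            exact (findGreatest_congr _ _ _ (fun k hk => by
              show winsB (a :: as) (b :: bs) k = true ↔ winsB (a :: as) bs k = true
              rw [winsB_cons_right (a :: as) b bs k (by omega)])).symm
        · -- a < b : g = 1 + g as bs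
          have hab : a < b := by omega
          rw [show gED (a :: as) (b :: bs) = 1 + gED as bs by rw [gED]; simp [hba]]
          rw [ih as bs (by simp at h ⊢; omega) hbs]
          have hmin : min (a :: as).length (b :: bs).length = min as.length bs.length + 1 := by
            simp [Nat.succ_min_succ]
          rw [hmin]
          have hb_le : ∀ x ∈ bs, b ≤ x := (List.pairwise_cons.mp hsb).1
          have hshift := findGreatest_shift (fun k => winsB (a :: as) (b :: bs) k = true)
            (fun k => winsB as bs k = true) (min as.length bs.length) (winsB_zero as bs)
            (fun k hk => by
              show winsB (a :: as) (b :: bs) (k + 1) = true ↔ winsB as bs k = true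
              have hk1 : k ≤ as.length := by omega
              have hk2 : k ≤ bs.length := by omega
              have hlenc : (b :: bs).length = bs.length + 1 := by simp
              rw [winsB_iff (a :: as) (b :: bs) (k + 1) (by simp; omega) (by simp; omega),
                  winsB_iff as bs k hk1 hk2]
              constructor
              · intro hw i hi
                have := hw (i + 1) (by omega)
                have e1 : (b :: bs).length - (k + 1) + (i + 1) = (bs.length - k + i) + 1 := by
                  simp; omega
                simp only [e1] at this
                simpa using this
              · intro hw i hi
                cases i with
                | zero =>
                  simp only [List.getElem_cons_zero]
                  rcases Nat.eq_zero_or_pos ((b :: bs).length - (k + 1)) with hz | hpos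
                  · simp only [hz]; simpa using hab
                  · have e1 : (b :: bs).length - (k + 1) + 0 = (bs.length - (k + 1)) + 1 := by
                      simp only [List.length_cons]; omega
                    simp only [e1, List.getElem_cons_succ]
                    have : b ≤ bs[bs.length - (k + 1)]'(by omega) :=
                      hb_le _ (List.getElem_mem _)
                    omega
                | succ i =>
                  have := hw i (by omega)
                  have e1 : (b :: bs).length - (k + 1) + (i + 1) = (bs.length - k + i) + 1 := by
                    simp; omega
                  simp only [e1, List.getElem_cons_succ]
                  simpa using this)
          rw [hshift]
          push_cast
          ring

theorem bsearch_eq (sa sb : List Int) (hsb : sb.Pairwise (· ≤ ·)) (fuel : Nat) :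
    ∀ (lo hi : Nat), hi - lo ≤ fuel →
      lo ≤ Nat.findGreatest (fun k => winsB sa sb k = true) (min sa.length sb.length) →
      Nat.findGreatest (fun k => winsB sa sb k = true) (min sa.length sb.length) ≤ hi →
      hi ≤ min sa.length sb.length →
      bsearchB sa sb lo hi = Nat.findGreatest (fun k => winsB sa sb k = true) (min sa.length sb.length) := by
  have hPK : winsB sa sb (Nat.findGreatest (fun k => winsB sa sb k = true) (min sa.length sb.length)) = true :=
    Nat.findGreatest_spec (P := fun k => winsB sa sb k = true)
      (n := min sa.length sb.length) (m := 0) (Nat.zero_le _) (winsB_zero sa sb)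
  have hKle : Nat.findGreatest (fun k => winsB sa sb k = true) (min sa.length sb.length) ≤ min sa.length sb.length :=
    Nat.findGreatest_le _
  induction fuel with
  | zero =>
    intro lo hi hf h1 h2 _
    have : lo = hi := by omega
    subst this
    rw [bsearchB, if_neg (by omega)]
    omega
  | succ fuel ih =>
    intro lo hi hf h1 h2 h3
    rw [bsearchB]
    by_cases hlh : lo < hi
    · rw [if_pos hlh]
      simp only
      by_cases hw : winsB sa sb ((lo + hi + 1) / 2) = true
      · rw [if_pos hw]
        exact ih ((lo + hi + 1) / 2) hi (by omega)
          (Nat.le_findGreatest (by omega) hw) h2 h3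
      · rw [if_neg hw]
        have hKlt : Nat.findGreatest (fun k => winsB sa sb k = true) (min sa.length sb.length) < (lo + hi + 1) / 2 := by
          by_contra hc
          exact hw (winsB_mono_down sa sb hsb _ hKle hPK _ (by omega))
        exact ih lo ((lo + hi + 1) / 2 - 1) (by omega) h1 (by omega) (by omega)
    · rw [if_neg hlh]
      omega

theorem sorted_ne_nil (B : List Int) (h : B ≠ []) :
    PySem.List.sorted B (fun x => x) false ≠ [] := by
  intro hnil
  have hperm := PySem.List.sorted_perm (xs := B) (key := fun x : Int => x) (rev := false)
  rw [hnil] at hperm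
  exact h (List.Perm.nil_eq hperm).symm

-- ===== VERDICT (by name: the statements are the Claim_ definitions above) =====
theorem solution_spec : Claim_equal_solution := by
  intro A B _ hpre
  unfold Spec_solution solution solution_alt
  have hne := sorted_ne_nil B hpre
  have hsb : (PySem.List.sorted B (fun x => x) false).Pairwise (· ≤ ·) := by
    simpa using PySem.List.sorted_pairwise (xs := B) (key := fun x : Int => x)
  cases hsbeq : PySem.List.sorted B (fun x => x) false with
  | nil => exact absurd hsbeq hne
  | cons tmp rest =>
    simp only
    rw [hsbeq] at hsb
    rw [loopA_eq_g ((PySem.List.sorted A (fun x => x) false).length + rest.length + 1) _ _ _ _ (by omega)]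
    rw [g_eq_findGreatest ((PySem.List.sorted A (fun x => x) false).length + (tmp :: rest).length)
      _ _ (le_refl _) hsb]
    rw [bsearch_eq _ _ hsb (min (PySem.List.sorted A (fun x => x) false).length (tmp :: rest).length)
      0 _ (by omega) (Nat.zero_le _) (Nat.findGreatest_le _) (le_refl _)]
    simp
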